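-- pv_equiv track=rewrite | github.com/cmkwong/Udemy_note_gen | code/common.py | compara_transcript_with_mark
-- ===== SOURCE A (Python) =====
-- def compara_transcript_with_mark(transcript_list, mark_list):
--     '''
--     :param transcript_list: [str]
--     :param mark_list: [str]
--     :return: [str]
--     '''
--     i = 0
--     text_buffer = ''
--     text_list = []
--     for sentc in transcript_list:
--         text_buffer += sentc + ' '
--         if i < len(mark_list):
--             if sentc == mark_list[i]:
--                 text_list.append(text_buffer)
--                 text_buffer = ''
--                 i += 1
--     # text_list.append(text_buffer)  # dont forget the last append
--     return text_list
-- ===== SOURCE B (Python) =====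
-- def compara_transcript_with_mark(transcript_list, mark_list):
--     segments = []
--     rest = transcript_list
--     for mark in mark_list:
--         try:
--             j = rest.index(mark)
--         except ValueError:
--             break
--         segments.append(''.join(s + ' ' for s in rest[:j + 1]))
--         rest = rest[j + 1:]
--     return segments
-- ===== Notes on version B (the rewrite author's own statement) =====
-- stated objective: alternative
-- what changed: B recurses over the mark list, finding each mark in the remaining transcript with list.index and slicing/joining each segment, instead of A's single fused loop over the transcript that accumulates a buffer and flushes it on each match.
import Mathlib
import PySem

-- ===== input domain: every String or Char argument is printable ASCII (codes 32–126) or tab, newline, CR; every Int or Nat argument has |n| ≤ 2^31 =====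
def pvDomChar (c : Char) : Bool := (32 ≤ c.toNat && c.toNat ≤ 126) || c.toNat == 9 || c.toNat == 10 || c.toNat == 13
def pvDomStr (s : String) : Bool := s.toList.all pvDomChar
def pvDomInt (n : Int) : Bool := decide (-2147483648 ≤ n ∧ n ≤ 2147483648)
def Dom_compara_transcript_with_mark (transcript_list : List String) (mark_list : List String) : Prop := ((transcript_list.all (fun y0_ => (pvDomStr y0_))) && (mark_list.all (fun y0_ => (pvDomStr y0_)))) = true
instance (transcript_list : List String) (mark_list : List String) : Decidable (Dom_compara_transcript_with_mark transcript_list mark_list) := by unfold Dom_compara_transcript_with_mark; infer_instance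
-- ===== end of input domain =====

-- B: instead of A's single fused accumulate-and-flush pass over the transcript, B recurses on the
-- mark list, locating each mark in the remaining transcript with list.index and joining each slice;
-- objective: alternative decomposition (same asymptotic cost).


-- ===== PORT A =====
-- the 'for sentc in transcript_list' loop with state (i, text_buffer, text_list);
-- mark_list[i] is read under the guard i < len(mark_list), so List.getD is exact here
def pvALoop (marks : List String) : List String → Nat → String → List String → List String
  | [], _, _, acc => acc
  | sentc :: rest, i, buf, acc =>
    let buf' := buf ++ (sentc ++ " ")
    if i < marks.length then
      if sentc = marks.getD i "" then
        pvALoop marks rest (i + 1) "" (acc ++ [buf'])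
      else
        pvALoop marks rest i buf' acc
    else
      pvALoop marks rest i buf' acc

def compara_transcript_with_mark (transcript_list : List String) (mark_list : List String) : List String :=
  pvALoop mark_list transcript_list 0 "" []

-- ===== PORT B =====
-- ''.join(s + ' ' for s in xs)
def pvJoinSeg (xs : List String) : String :=
  PySem.Str.join "" (xs.map (fun s => s ++ " "))

-- the 'for mark in mark_list' loop of Source B; rest.index(mark) → PySem.List.index?
-- (the try/except ValueError break is the 'none' branch); rest[:j+1] / rest[j+1:] → PySem.List.slice
def pvBLoop : List String → List String → List String
  | _, [] => []
  | rest, mark :: ms =>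
    match PySem.List.index? rest mark with
    | none => []
    | some j =>
        pvJoinSeg (PySem.List.slice rest none (some ((j : Int) + 1)))
          :: pvBLoop (PySem.List.slice rest (some ((j : Int) + 1)) none) ms

def compara_transcript_with_mark_alt (transcript_list : List String) (mark_list : List String) : List String :=
  pvBLoop transcript_list mark_list

-- ===== PRECONDITION & SPEC =====
def Spec_compara_transcript_with_mark (transcript_list : List String) (mark_list : List String) (out : List String) : Prop := out = compara_transcript_with_mark_alt transcript_list mark_list
instance (transcript_list : List String) (mark_list : List String) (out : List String) : Decidable (Spec_compara_transcript_with_mark transcript_list mark_list out) := by unfold Spec_compara_transcript_with_mark; infer_instance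

-- ===== CLAIM (what is proved, stated in full; the proofs are below) =====
def Claim_equal_compara_transcript_with_mark : Prop := ∀ (transcript_list : List String) (mark_list : List String), Dom_compara_transcript_with_mark transcript_list mark_list → Spec_compara_transcript_with_mark transcript_list mark_list (compara_transcript_with_mark transcript_list mark_list)

-- ===== LEMMAS AND PROOFS =====

theorem joinSeg_cons (x : String) (l : List String) :
    pvJoinSeg (x :: l) = (x ++ " ") ++ pvJoinSeg l := by
  cases l <;>
    simp [pvJoinSeg, ← String.toList_inj, PySem.Str.toList_join, PySem.Chars.join, List.intercalate]

-- pvBLoop with the slices rewritten to take/drop, and the flushed buffer prefixed to the first segment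
def pvBPre (buf : String) : List String → List String → List String
  | _, [] => []
  | rest, mark :: ms =>
    match PySem.List.index? rest mark with
    | none => []
    | some j => (buf ++ pvJoinSeg (rest.take (j + 1))) :: pvBLoop (rest.drop (j + 1)) ms

theorem bLoop_eq_bPre (rest ms : List String) : pvBLoop rest ms = pvBPre "" rest ms := by
  cases ms with
  | nil => rfl
  | cons m ms =>
    simp only [pvBLoop, pvBPre]
    cases h : PySem.List.index? rest m with
    | none => rfl
    | some j =>
      have h1 : ((j : Int) + 1) = ((j + 1 : Nat) : Int) := by push_cast; ring
      dsimp only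
      rw [h1, PySem.List.slice_to_natCast, PySem.List.slice_from_natCast]
      simp

-- once i has run past mark_list, A's loop only grows the (discarded) buffer
theorem aLoop_past (marks : List String) (rest : List String) :
    ∀ i buf acc, marks.length ≤ i → pvALoop marks rest i buf acc = acc := by
  induction rest with
  | nil => intro i buf acc _; rfl
  | cons s r ih =>
    intro i buf acc h
    simp only [pvALoop]
    rw [if_neg (by omega)]
    exact ih i _ acc h

-- main invariant: A's loop from state (i, buf, acc) appends exactly B's segments for the
-- remaining marks, with buf prefixed to the first one
theorem aLoop_eq_bPre (marks : List String) (rest : List String) :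
    ∀ i buf acc, pvALoop marks rest i buf acc = acc ++ pvBPre buf rest (marks.drop i) := by
  induction rest with
  | nil =>
    intro i buf acc
    cases h : marks.drop i with
    | nil => simp [pvALoop, pvBPre]
    | cons m ms => simp [pvALoop, pvBPre, PySem.List.index?_eq_idxOf?]
  | cons s r ih =>
    intro i buf acc
    by_cases hi : i < marks.length
    · have hdrop : marks.drop i = marks[i] :: marks.drop (i + 1) :=
        List.drop_eq_getElem_cons hi
      have hgetD : marks.getD i "" = marks[i] := by
        simp [List.getD, List.getElem?_eq_getElem hi]
      by_cases hs : s = marks[i]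
      · -- match: A flushes buf ++ s ++ ' '; B finds the mark at index 0
        simp only [pvALoop, if_pos hi, hgetD, if_pos hs, hdrop, pvBPre]
        rw [ih (i + 1) "" (acc ++ [buf ++ (s ++ " ")])]
        have hidx : PySem.List.index? (s :: r) marks[i] = some 0 := by
          rw [← hs]; simp [PySem.List.index?_eq_idxOf?, List.idxOf?, List.findIdx?_cons]
        rw [hidx]
        simp [pvJoinSeg, bLoop_eq_bPre, PySem.Str.join]
      · -- no match: buf grows by s ++ ' '
        simp only [pvALoop, if_pos hi, hgetD, if_neg hs]
        rw [ih i (buf ++ (s ++ " ")) acc, hdrop]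
        simp only [pvBPre]
        have hidx : PySem.List.index? (s :: r) marks[i]
            = (PySem.List.index? r marks[i]).map (· + 1) :=
          PySem.List.index?_cons_of_ne _ hs
        rw [hidx]
        cases h : PySem.List.index? r marks[i] with
        | none => rfl
        | some j =>
          simp only [Option.map_some]
          congr 1
          have htake : (s :: r).take (j + 1 + 1) = s :: r.take (j + 1) := rfl
          have hdrop2 : (s :: r).drop (j + 1 + 1) = r.drop (j + 1) := rfl
          rw [htake, hdrop2, joinSeg_cons]
          simp [String.append_assoc]
    · -- i past the marks: both sides are acc / acc ++ []
      have hnil : marks.drop i = [] := List.drop_eq_nil_of_le (by omega)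
      simp only [pvALoop, if_neg hi, hnil, pvBPre]
      rw [aLoop_past marks r i _ acc (by omega)]
      simp

-- ===== VERDICT (by name: the statement is the Claim_ definition above) =====
theorem compara_transcript_with_mark_spec : Claim_equal_compara_transcript_with_mark := by
  intro t m _
  unfold Spec_compara_transcript_with_mark compara_transcript_with_mark compara_transcript_with_mark_alt
  rw [aLoop_eq_bPre, bLoop_eq_bPre]
  simp
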